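-- pv_equiv track=rewrite | github.com/Alquila/findTandemRepeats-bioinfProject2023 | stoye_gusfield_algorithm.py | stupid_algorithm
-- ===== SOURCE A (Python) =====
-- def stupid_algorithm(sequence):
--     tandem_repeats = []
--     for i in range(0, len(sequence)-1):
--         for j in range(i+2, len(sequence)-1):
--             length = j - i
--             if sequence[i:j] == sequence[i + length:j + length]:
--                 tandem_repeats.append([i, length])
--     return tandem_repeats
-- ===== SOURCE B (Python) =====
-- def stupid_algorithm(sequence):
--     # Dynamic programming on longest common extensions, scanning starts from the end.
--     n = len(sequence)
--     cur = [0] * (n + 1)  # row for start index i+1: cur[k] = LCE(i+1, k)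
--     chunks = []
--     for i in range(n - 1, -1, -1):
--         cur = [cur[k + 1] + 1 if sequence[i] == sequence[k] else 0 for k in range(n)] + [0]
--         chunks.append([[i, L] for L in range(2, (n - i) // 2 + 1) if cur[i + L] >= L])
--     return [pair for ch in reversed(chunks) for pair in ch]
-- ===== Notes on version B (the rewrite author's own statement) =====
-- stated objective: alternative
-- what changed: Replaces the all-pairs slice comparison with a longest-common-extension dynamic program: a row of common-extension lengths is updated while scanning start positions from the end, so each candidate tandem repeat is decided by one table lookup instead of a substring comparison.
import Mathlib
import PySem

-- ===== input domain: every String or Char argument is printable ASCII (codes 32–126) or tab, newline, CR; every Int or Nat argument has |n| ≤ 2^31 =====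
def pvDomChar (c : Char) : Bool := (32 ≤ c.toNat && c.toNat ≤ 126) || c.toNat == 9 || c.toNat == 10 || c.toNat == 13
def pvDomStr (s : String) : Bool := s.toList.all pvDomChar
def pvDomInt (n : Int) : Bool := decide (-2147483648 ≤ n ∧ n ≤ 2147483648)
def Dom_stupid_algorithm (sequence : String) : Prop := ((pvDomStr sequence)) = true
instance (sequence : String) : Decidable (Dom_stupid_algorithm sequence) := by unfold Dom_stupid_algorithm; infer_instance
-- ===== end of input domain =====

/- B decides each candidate tandem repeat by one lookup in a longest-common-extension
   dynamic-programming row instead of A's substring comparison (objective: alternative). -/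
-- ===== PORT A =====
def stupid_algorithm (sequence : String) : List (List Int) :=
  (PySem.List.pyRange 0 (PySem.Str.len sequence - 1) 1).foldl (fun acc i =>
    (PySem.List.pyRange (i + 2) (PySem.Str.len sequence - 1) 1).foldl (fun acc2 j =>
      let length := j - i
      if PySem.Str.slice sequence (some i) (some j)
         = PySem.Str.slice sequence (some (i + length)) (some (j + length))
      then acc2 ++ [[i, length]] else acc2) acc) []

-- ===== PORT B =====
-- indexing into `cur` / `sequence` is always in range in this loop (comments in Source B)
def stupid_algorithm_alt (sequence : String) : List (List Int) :=
  let n : Int := PySem.Str.len sequence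
  ((PySem.List.pyRange (n - 1) (-1) (-1)).foldl (fun st i =>
      let cur : List Int :=
        (PySem.List.pyRange 0 n 1).map (fun k =>
          if PySem.Str.pyGet? sequence i = PySem.Str.pyGet? sequence k
          then PySem.List.pyGetD st.1 (k + 1) 0 + 1 else 0) ++ [0]
      let found : List (List Int) :=
        (PySem.List.pyRange 2 (PySem.Int.floordiv (n - i) 2 + 1) 1).filterMap (fun L =>
          if PySem.List.pyGetD cur (i + L) 0 ≥ L then some [i, L] else none)
      (cur, st.2 ++ [found]))
    (PySem.List.pyRepeat [0] (n + 1), ([] : List (List (List Int))))).2.reverse.flatMap (fun ch => ch)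

-- ===== PRECONDITION & SPEC =====
def Spec_stupid_algorithm (sequence : String) (out : List (List Int)) : Prop := out = stupid_algorithm_alt sequence
instance (sequence : String) (out : List (List Int)) : Decidable (Spec_stupid_algorithm sequence out) := by unfold Spec_stupid_algorithm; infer_instance

-- ===== CLAIM (what is proved, stated in full; the proofs are below) =====
def Claim_equal_stupid_algorithm : Prop := ∀ (sequence : String), Dom_stupid_algorithm sequence → Spec_stupid_algorithm sequence (stupid_algorithm sequence)

-- ===== LEMMAS AND PROOFS =====

/- Spec-side notions shared by both directions: `pvPairs cs i` is the list of tandem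
   repeats [i, L] (L = 2+k) starting at i, in increasing L, and `pvSpec` concatenates
   them for i ascending. -/
def pvPairs (cs : List Char) (i : Nat) : List (List Int) :=
  (List.range (cs.length - i)).filterMap (fun k =>
    if (cs.drop i).take (2+k) = (cs.drop (i+(2+k))).take (2+k)
    then some [(i : Int), ((2+k : Nat) : Int)] else none)

def pvSpec (cs : List Char) : List (List Int) :=
  (List.range cs.length).flatMap (pvPairs cs)

/- longest common extension of positions i and k -/
def pvLce (cs : List Char) (i k : Nat) : Nat :=
  if h : i < cs.length ∧ k < cs.length ∧ cs[i]? = cs[k]? then pvLce cs (i+1) (k+1) + 1 else 0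
termination_by cs.length - i
decreasing_by omega

def pvRow (cs : List Char) (i : Nat) : List Int :=
  (List.range cs.length).map (fun k => (pvLce cs i k : Int)) ++ [0]

lemma pv_foldl_filterMap {α β : Type} (p : α → Prop) [DecidablePred p] (f : α → β) :
    ∀ (l : List α) (acc : List β),
      l.foldl (fun a x => if p x then a ++ [f x] else a) acc
        = acc ++ l.filterMap (fun x => if p x then some (f x) else none) := by
  intro l
  induction l with
  | nil => simp
  | cons x t ih =>
    intro acc
    by_cases h : p x <;> simp [h, ih, List.append_assoc]

lemma pv_filterMap_range_congr {β : Type} (f : Nat → Option β) (c d : Nat) (hcd : c ≤ d)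
    (h : ∀ x, c ≤ x → f x = none) :
    (List.range d).filterMap f = (List.range c).filterMap f := by
  induction d, hcd using Nat.le_induction with
  | base => rfl
  | succ n hn ih => rw [List.range_succ, List.filterMap_append, ih]; simp [h n hn]

lemma pv_flatMap_congr {α β : Type} {l : List α} {f g : α → List β}
    (h : ∀ x ∈ l, f x = g x) : l.flatMap f = l.flatMap g := by
  induction l with
  | nil => rfl
  | cons x t ih =>
    simp only [List.flatMap_cons, h x (List.mem_cons_self), ih fun y hy => h y (List.mem_cons_of_mem x hy)]

lemma pv_good_len (cs : List Char) (i L : Nat) (hL : 1 ≤ L) (hi : i < cs.length)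
    (h2 : cs.length < i + 2*L) :
    ¬ ((cs.drop i).take L = (cs.drop (i+L)).take L) := by
  intro h
  have := congrArg List.length h
  simp only [List.length_take, List.length_drop] at this
  omega

lemma pv_lce_oob (cs : List Char) (i k : Nat) (h : cs.length ≤ i ∨ cs.length ≤ k) :
    pvLce cs i k = 0 := by
  rw [pvLce]
  exact dif_neg (by rintro ⟨h1, h2, -⟩; omega)

lemma pv_lce_le_iff (cs : List Char) :
    ∀ (L i k : Nat), i + L ≤ cs.length → k + L ≤ cs.length →
      (L ≤ pvLce cs i k ↔ (cs.drop i).take L = (cs.drop k).take L) := by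
  intro L
  induction L with
  | zero => intro i k _ _; simp
  | succ L ih =>
    intro i k hi hk
    have hi' : i < cs.length := by omega
    have hk' : k < cs.length := by omega
    rw [List.drop_eq_getElem_cons hi', List.drop_eq_getElem_cons hk',
        List.take_succ_cons, List.take_succ_cons, pvLce]
    by_cases hc : cs[i]? = cs[k]?
    · rw [dif_pos ⟨hi', hk', hc⟩]
      have hv : cs[i] = cs[k] := by
        rw [List.getElem?_eq_getElem hi', List.getElem?_eq_getElem hk'] at hc
        exact Option.some.inj hc
      simp only [hv, List.cons.injEq, true_and]
      rw [Nat.succ_le_succ_iff]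
      exact ih (i+1) (k+1) (by omega) (by omega)
    · rw [dif_neg (by rintro ⟨-, -, h⟩; exact hc h)]
      constructor
      · omega
      · intro hv
        have h1 : cs[i] = cs[k] := (List.cons_eq_cons.mp hv).1
        exact absurd (by rw [List.getElem?_eq_getElem hi', List.getElem?_eq_getElem hk', h1]) hc

lemma pv_row_getD (cs : List Char) (i m : Nat) (hm : m ≤ cs.length) :
    (pvRow cs i).getD m 0 = (pvLce cs i m : Int) := by
  rcases Nat.lt_or_ge m cs.length with h | h
  · rw [pvRow, List.getD_eq_getElem?_getD, List.getElem?_append_left (by simpa using h)]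
    simp [h]
  · have hm' : m = cs.length := by omega
    subst hm'
    rw [pvRow, List.getD_eq_getElem?_getD, List.getElem?_append_right (by simp)]
    simp [pv_lce_oob cs i cs.length (Or.inr le_rfl)]

lemma pv_row_init (cs : List Char) :
    List.replicate (cs.length + 1) (0 : Int) = pvRow cs cs.length := by
  rw [pvRow, List.replicate_succ']
  congr 1
  symm
  rw [List.eq_replicate_iff]
  constructor
  · simp
  · intro b hb
    simp only [List.mem_map, List.mem_range] at hb
    obtain ⟨k, -, hk⟩ := hb
    rw [pv_lce_oob cs cs.length k (Or.inl le_rfl)] at hk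
    simpa using hk.symm

/- `pvPairs` is empty when no full second copy fits (in particular at i = n-1, n-2, n-3). -/
lemma pv_pairs_nil (cs : List Char) (i : Nat) (hi : cs.length < i + 4) :
    pvPairs cs i = [] := by
  rw [pvPairs, List.filterMap_eq_nil_iff]
  intro a ha
  simp only [List.mem_range] at ha
  rcases Nat.lt_or_ge i cs.length with h | h
  · rw [if_neg (pv_good_len cs i (2+a) (by omega) h (by omega))]
  · omega

-- ===== A-side =====

lemma pv_string_eq_iff (u v : String) : u = v ↔ u.toList = v.toList :=
  ⟨fun h => by rw [h], fun h => by apply String.ext; exact h⟩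

lemma pv_slice_toList (s : String) (a b : Nat) :
    (PySem.Str.slice s (some (a : Int)) (some (b : Int))).toList = (s.toList.drop a).take (b - a) := by
  simp [PySem.List.slice_natCast]

lemma pv_A (s : String) : stupid_algorithm s = pvSpec s.toList := by
  unfold stupid_algorithm
  simp only [PySem.Str.len_eq, PySem.List.pyRange_one]
  rw [show ((s.toList.length : Int) - 1 - 0).toNat = s.toList.length - 1 from by omega,
      List.foldl_map]
  simp only [zero_add, pv_foldl_filterMap, PySem.List.foldl_append_eq_flatMap, List.nil_append]
  rcases Nat.eq_zero_or_pos s.toList.length with h0 | h0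
  · simp [pvSpec, h0]
  · conv_rhs => rw [pvSpec]
    rw [show (List.range s.toList.length) = List.range (s.toList.length - 1) ++ [s.toList.length - 1]
          from by rw [← List.range_succ]; congr 1; omega,
        List.flatMap_append]
    rw [show (List.flatMap (pvPairs s.toList) [s.toList.length - 1]) = [] from by
          rw [List.flatMap_singleton]; exact pv_pairs_nil s.toList (s.toList.length - 1) (by omega),
        List.append_nil]
    apply pv_flatMap_congr
    intro k hk
    simp only [List.mem_range] at hk
    rw [show ((k : Int) + 2) = ((k + 2 : Nat) : Int) from by push_cast; ring,
        show (((s.toList.length : Int) - 1) - ((k + 2 : Nat) : Int)).toNat = s.toList.length - k - 3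
          from by omega,
        List.filterMap_map]
    have hpt : ∀ m ∈ List.range (s.toList.length - k - 3),
        ((fun j => if PySem.Str.slice s (some ((k : Int))) (some j)
              = PySem.Str.slice s (some ((k : Int) + (j - (k : Int)))) (some (j + (j - (k : Int))))
            then some [(k : Int), j - (k : Int)] else none) ∘ (fun (m : Nat) => ((k + 2 : Nat) : Int) + (m : Int))) m
          = (fun m => if (s.toList.drop k).take (2 + m) = (s.toList.drop (k + (2 + m))).take (2 + m)
              then some [(k : Int), ((2 + m : Nat) : Int)] else none) m := by
      intro m hm
      simp only [Function.comp_apply]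
      rw [show ((k + 2 : Nat) : Int) + (m : Int) = ((k + 2 + m : Nat) : Int) from by push_cast; ring]
      rw [show ((k + 2 + m : Nat) : Int) - (k : Int) = ((2 + m : Nat) : Int) from by push_cast; ring]
      rw [show (k : Int) + ((2 + m : Nat) : Int) = ((k + (2 + m) : Nat) : Int) from by push_cast; ring]
      rw [show ((k + 2 + m : Nat) : Int) + ((2 + m : Nat) : Int) = ((k + 2 + m + (2 + m) : Nat) : Int)
            from by push_cast; ring]
      have hcond : (PySem.Str.slice s (some ((k : Nat) : Int)) (some ((k + 2 + m : Nat) : Int))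
            = PySem.Str.slice s (some ((k + (2 + m) : Nat) : Int)) (some ((k + 2 + m + (2 + m) : Nat) : Int)))
          ↔ ((s.toList.drop k).take (2 + m) = (s.toList.drop (k + (2 + m))).take (2 + m)) := by
        rw [pv_string_eq_iff, pv_slice_toList, pv_slice_toList,
            show k + 2 + m - k = 2 + m from by omega,
            show k + 2 + m + (2 + m) - (k + (2 + m)) = 2 + m from by omega]
      simp only [hcond]
    rw [List.filterMap_congr hpt, pvPairs,
        pv_filterMap_range_congr _ (s.toList.length - k - 3) (s.toList.length - k) (by omega)
          (fun m hm => if_neg (pv_good_len s.toList k (2 + m) (by omega) (by omega) (by omega)))]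

-- ===== B-side =====

lemma pv_found (s : String) (t : Nat) (ht : t < s.toList.length) :
    (PySem.List.pyRange 2 (PySem.Int.floordiv ((s.toList.length : Int) - (t : Int)) 2 + 1) 1).filterMap
      (fun L => if PySem.List.pyGetD (pvRow s.toList t) ((t : Int) + L) 0 ≥ L then some [(t : Int), L] else none)
      = pvPairs s.toList t := by
  have hsub : ((s.toList.length : Int) - (t : Int)) = ((s.toList.length - t : Nat) : Int) := by omega
  rw [hsub]
  have h2 : PySem.Int.floordiv ((s.toList.length - t : Nat) : Int) 2 = (((s.toList.length - t)/2 : Nat) : Int) := by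
    exact_mod_cast PySem.Int.floordiv_natCast (s.toList.length - t) 2
  rw [h2, PySem.List.pyRange_one]
  rw [show (((((s.toList.length - t) / 2 : Nat) : Int) + 1) - 2).toNat = (s.toList.length - t) / 2 - 1
        from by omega,
      List.filterMap_map]
  have hpt : ∀ m ∈ List.range ((s.toList.length - t) / 2 - 1),
      ((fun L => if PySem.List.pyGetD (pvRow s.toList t) ((t : Int) + L) 0 ≥ L
          then some [(t : Int), L] else none) ∘ (fun (k : Nat) => 2 + (k : Int))) m
        = (fun k => if (s.toList.drop t).take (2 + k) = (s.toList.drop (t + (2 + k))).take (2 + k)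
            then some [(t : Int), ((2 + k : Nat) : Int)] else none) m := by
    intro m hm
    simp only [List.mem_range] at hm
    simp only [Function.comp_apply]
    rw [show ((t : Int) + (2 + (m : Int))) = ((t + (2 + m) : Nat) : Int) from by push_cast; ring,
        PySem.List.pyGetD_natCast, pv_row_getD s.toList t (t + (2 + m)) (by omega)]
    rw [show ((2 : Int) + (m : Int)) = ((2 + m : Nat) : Int) from by push_cast; ring]
    simp only [ge_iff_le, Nat.cast_le,
      pv_lce_le_iff s.toList (2 + m) t (t + (2 + m)) (by omega) (by omega)]
  rw [List.filterMap_congr hpt, pvPairs,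
      pv_filterMap_range_congr _ ((s.toList.length - t) / 2 - 1) (s.toList.length - t) (by omega)
        (fun m hm => if_neg (pv_good_len s.toList t (2 + m) (by omega) ht (by omega)))]

lemma pv_cur (s : String) (t : Nat) (ht : t < s.toList.length) (prev : List Int)
    (hprev : prev = pvRow s.toList (t+1)) :
    ((PySem.List.pyRange 0 (s.toList.length : Int) 1).map (fun k =>
        if PySem.Str.pyGet? s (t : Int) = PySem.Str.pyGet? s k
        then PySem.List.pyGetD prev (k + 1) 0 + 1 else 0) ++ [0])
      = pvRow s.toList t := by
  rw [PySem.List.pyRange_one]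
  rw [show ((s.toList.length : Int) - 0).toNat = s.toList.length from by omega]
  rw [pvRow, List.map_map]
  congr 1
  apply List.map_congr_left
  intro k hk
  simp only [List.mem_range] at hk
  simp only [Function.comp_apply, zero_add, PySem.Str.pyGet?_natCast]
  rw [hprev, show ((k : Int) + 1) = ((k + 1 : Nat) : Int) from by push_cast; ring,
      PySem.List.pyGetD_natCast, pv_row_getD s.toList (t + 1) (k + 1) (by omega)]
  conv_rhs => rw [pvLce]
  by_cases hcnd : s.toList[t]? = s.toList[k]?
  · rw [if_pos hcnd, dif_pos ⟨ht, hk, hcnd⟩]; push_cast; ring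
  · rw [if_neg hcnd, dif_neg (by rintro ⟨-, -, h⟩; exact hcnd h)]; simp

lemma pv_inv (s : String) : ∀ (t : Nat), t ≤ s.toList.length → ∀ (R : List (List (List Int))),
    List.foldl
      (fun (st : List Int × List (List (List Int))) (i : Int) =>
        (List.map (fun k => if PySem.Str.pyGet? s i = PySem.Str.pyGet? s k
              then PySem.List.pyGetD st.1 (k + 1) 0 + 1 else 0)
            (PySem.List.pyRange 0 (s.toList.length : Int) 1) ++ [0],
         st.2 ++ [List.filterMap
            (fun x => if PySem.List.pyGetD
                  (List.map (fun k => if PySem.Str.pyGet? s i = PySem.Str.pyGet? s k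
                      then PySem.List.pyGetD st.1 (k + 1) 0 + 1 else 0)
                    (PySem.List.pyRange 0 (s.toList.length : Int) 1) ++ [0]) (i + x) 0 ≥ x
                then some [i, x] else none)
            (PySem.List.pyRange 2 (PySem.Int.floordiv ((s.toList.length : Int) - i) 2 + 1) 1)]))
      (pvRow s.toList t, R) (PySem.List.pyRange ((t : Int) - 1) (-1) (-1))
      = (pvRow s.toList 0, R ++ (List.range t).reverse.map (pvPairs s.toList)) := by
  intro t
  induction t with
  | zero =>
    intro _ R
    rw [show ((0 : Nat) : Int) - 1 = -1 from by norm_num,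
        PySem.List.pyRange_neg_one_eq_nil le_rfl]
    simp
  | succ t ih =>
    intro ht R
    rw [show (((t + 1 : Nat)) : Int) - 1 = (t : Int) from by push_cast; ring,
        PySem.List.pyRange_neg_one_cons (by omega)]
    simp only [List.foldl_cons]
    rw [pv_cur s t (by omega) (pvRow s.toList (t + 1)) rfl,
        pv_found s t (by omega),
        ih (by omega) (R ++ [pvPairs s.toList t]),
        List.range_succ]
    simp [List.append_assoc, List.reverse_append]

lemma pv_B (s : String) : stupid_algorithm_alt s = pvSpec s.toList := by
  unfold stupid_algorithm_alt
  simp only [PySem.Str.len_eq]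
  rw [show PySem.List.pyRepeat [(0 : Int)] ((s.toList.length : Int) + 1) = pvRow s.toList s.toList.length from by
        rw [PySem.List.pyRepeat_singleton,
            show ((s.toList.length : Int) + 1).toNat = s.toList.length + 1 from by omega]
        exact pv_row_init s.toList]
  refine (congrArg (fun p : List Int × List (List (List Int)) => p.2.reverse.flatMap (fun ch => ch))
      (pv_inv s s.toList.length le_rfl [])).trans ?_
  simp only [List.nil_append, List.map_reverse, List.reverse_reverse]
  rw [pvSpec, List.flatMap_map]

-- ===== VERDICT (by name: the statement is the Claim_ definition above) =====
theorem stupid_algorithm_spec : Claim_equal_stupid_algorithm := by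
  intro sequence _
  unfold Spec_stupid_algorithm
  rw [pv_A, pv_B]
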